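-- pv_equiv track=rewrite | github.com/nodiinc/nodi-libs | legacy/datatype_tool.py | bits_to_word1
-- ===== SOURCE A (Python) =====
-- def bits_to_word1(bit00, bit01, bit02, bit03, bit04, bit05, bit06, bit07,
--                   bit08, bit09, bit10, bit11, bit12, bit13, bit14, bit15):
--     bits = [bit15, bit14, bit13, bit12, bit11, bit10, bit09, bit08,
--             bit07, bit06, bit05, bit04, bit03, bit02, bit01, bit00]
--     if all(isinstance(bit, bool) for bit in bits):
--         result = 0
--         for i, bit in enumerate(bits):
--             result |= int(bit) << i
--         return result
--     else:
--         return None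
-- ===== SOURCE B (Python) =====
-- def bits_to_word1(bit00, bit01, bit02, bit03, bit04, bit05, bit06, bit07,
--                   bit08, bit09, bit10, bit11, bit12, bit13, bit14, bit15):
--     bits = [bit00, bit01, bit02, bit03, bit04, bit05, bit06, bit07,
--             bit08, bit09, bit10, bit11, bit12, bit13, bit14, bit15]
--     if not all(isinstance(bit, bool) for bit in bits):
--         return None
--     return int(''.join(str(int(bit)) for bit in bits), 2)
-- ===== Notes on version B (the rewrite author's own statement) =====
-- stated objective: idiomatic
-- what changed: B assembles the word as a binary string (MSB-to-LSB join of '0'/'1') parsed with int(s, 2), instead of A's reversed-list enumerate with shift-and-OR accumulation.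
import Mathlib
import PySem

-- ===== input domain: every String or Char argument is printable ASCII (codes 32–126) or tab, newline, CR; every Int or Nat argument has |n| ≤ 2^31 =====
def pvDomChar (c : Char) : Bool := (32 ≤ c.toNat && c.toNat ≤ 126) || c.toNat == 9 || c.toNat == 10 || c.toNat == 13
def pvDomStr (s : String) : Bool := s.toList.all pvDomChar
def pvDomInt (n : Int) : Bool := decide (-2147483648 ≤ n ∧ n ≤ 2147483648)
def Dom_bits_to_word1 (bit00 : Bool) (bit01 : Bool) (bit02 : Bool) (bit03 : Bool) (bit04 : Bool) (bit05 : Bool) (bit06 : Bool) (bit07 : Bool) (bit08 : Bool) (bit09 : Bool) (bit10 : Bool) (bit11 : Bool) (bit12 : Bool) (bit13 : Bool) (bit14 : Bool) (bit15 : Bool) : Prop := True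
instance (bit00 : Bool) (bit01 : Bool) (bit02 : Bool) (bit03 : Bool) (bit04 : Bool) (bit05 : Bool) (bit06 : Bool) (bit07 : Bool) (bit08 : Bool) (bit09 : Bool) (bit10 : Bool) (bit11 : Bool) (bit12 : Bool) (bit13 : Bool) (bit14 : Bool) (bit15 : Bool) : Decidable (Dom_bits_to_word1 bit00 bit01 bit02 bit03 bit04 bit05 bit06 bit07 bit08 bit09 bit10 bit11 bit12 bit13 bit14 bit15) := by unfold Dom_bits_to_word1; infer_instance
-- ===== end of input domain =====

-- B builds the 16-bit word via a binary string parsed in base 2 instead of shift-and-OR accumulation (idiomatic rewrite).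


-- ===== PORT A =====
def bits_to_word1 (bit00 : Bool) (bit01 : Bool) (bit02 : Bool) (bit03 : Bool) (bit04 : Bool) (bit05 : Bool) (bit06 : Bool) (bit07 : Bool) (bit08 : Bool) (bit09 : Bool) (bit10 : Bool) (bit11 : Bool) (bit12 : Bool) (bit13 : Bool) (bit14 : Bool) (bit15 : Bool) : Option Int :=
  -- bits = [bit15, ..., bit00] (LSB first)
  let bits : List Bool := [bit15, bit14, bit13, bit12, bit11, bit10, bit09, bit08,
                           bit07, bit06, bit05, bit04, bit03, bit02, bit01, bit00]
  -- all arguments are Bool in Lean, so the isinstance guard always passes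
  if bits.all (fun _ => true) then
    some ((PySem.List.enumerate bits).foldl
      (fun result (p : Int × Bool) => PySem.Int.bor result ((if p.2 then (1 : Int) else 0) <<< p.1.toNat)) 0)
  else
    none

-- ===== PORT B =====
-- int(s, 2) for a string of '0'/'1' chars, ported by hand (exact on such strings)
def pvParseBin (s : String) : Int :=
  s.toList.foldl (fun acc c => 2 * acc + (if c = '1' then (1 : Int) else 0)) 0

def bits_to_word1_alt (bit00 : Bool) (bit01 : Bool) (bit02 : Bool) (bit03 : Bool) (bit04 : Bool) (bit05 : Bool) (bit06 : Bool) (bit07 : Bool) (bit08 : Bool) (bit09 : Bool) (bit10 : Bool) (bit11 : Bool) (bit12 : Bool) (bit13 : Bool) (bit14 : Bool) (bit15 : Bool) : Option Int :=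
  let bits : List Bool := [bit00, bit01, bit02, bit03, bit04, bit05, bit06, bit07,
                           bit08, bit09, bit10, bit11, bit12, bit13, bit14, bit15]
  -- all arguments are Bool in Lean, so the isinstance guard always passes
  if ¬ bits.all (fun _ => true) then
    none
  else
    some (pvParseBin (PySem.Str.join "" (bits.map (fun bit => PySem.Int.toStr (if bit then 1 else 0)))))

-- ===== PRECONDITION & SPEC =====
def Spec_bits_to_word1 (bit00 : Bool) (bit01 : Bool) (bit02 : Bool) (bit03 : Bool) (bit04 : Bool) (bit05 : Bool) (bit06 : Bool) (bit07 : Bool) (bit08 : Bool) (bit09 : Bool) (bit10 : Bool) (bit11 : Bool) (bit12 : Bool) (bit13 : Bool) (bit14 : Bool) (bit15 : Bool) (out : Option Int) : Prop := out = bits_to_word1_alt bit00 bit01 bit02 bit03 bit04 bit05 bit06 bit07 bit08 bit09 bit10 bit11 bit12 bit13 bit14 bit15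
instance (bit00 : Bool) (bit01 : Bool) (bit02 : Bool) (bit03 : Bool) (bit04 : Bool) (bit05 : Bool) (bit06 : Bool) (bit07 : Bool) (bit08 : Bool) (bit09 : Bool) (bit10 : Bool) (bit11 : Bool) (bit12 : Bool) (bit13 : Bool) (bit14 : Bool) (bit15 : Bool) (out : Option Int) : Decidable (Spec_bits_to_word1 bit00 bit01 bit02 bit03 bit04 bit05 bit06 bit07 bit08 bit09 bit10 bit11 bit12 bit13 bit14 bit15 out) := by unfold Spec_bits_to_word1; infer_instance

-- ===== CLAIM (what is proved, stated in full; the proofs are below) =====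
def Claim_equal_bits_to_word1 : Prop := ∀ (bit00 : Bool) (bit01 : Bool) (bit02 : Bool) (bit03 : Bool) (bit04 : Bool) (bit05 : Bool) (bit06 : Bool) (bit07 : Bool) (bit08 : Bool) (bit09 : Bool) (bit10 : Bool) (bit11 : Bool) (bit12 : Bool) (bit13 : Bool) (bit14 : Bool) (bit15 : Bool), Dom_bits_to_word1 bit00 bit01 bit02 bit03 bit04 bit05 bit06 bit07 bit08 bit09 bit10 bit11 bit12 bit13 bit14 bit15 → Spec_bits_to_word1 bit00 bit01 bit02 bit03 bit04 bit05 bit06 bit07 bit08 bit09 bit10 bit11 bit12 bit13 bit14 bit15 (bits_to_word1 bit00 bit01 bit02 bit03 bit04 bit05 bit06 bit07 bit08 bit09 bit10 bit11 bit12 bit13 bit14 bit15)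

-- ===== LEMMAS AND PROOFS =====

theorem nat_lor_two_pow_of_lt : ∀ (k m : Nat), m < 2^k → m ||| 2^k = m + 2^k := by
  intro k
  induction k with
  | zero => intro m h; interval_cases m; decide
  | succ k ih =>
    intro m h
    have hm : m = Nat.bit (decide (m % 2 = 1)) (m >>> 1) := (Nat.bit_decide_mod_two_eq_one_shiftRight_one m).symm
    have hp : (2:Nat)^(k+1) = Nat.bit false (2^k) := by simp [Nat.bit, Nat.pow_succ]; ring
    have hlt : m >>> 1 < 2^k := by
      simp [Nat.shiftRight_succ, Nat.shiftRight_zero]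
      omega
    rw [hm, hp, Nat.lor_bit, ih _ hlt]
    by_cases h2 : m % 2 = 1 <;> simp [Nat.bit, h2, Nat.shiftRight_one] <;> omega

theorem bor_step (a : Int) (b : Bool) (k : Nat) (h0 : 0 ≤ a) (h1 : a < 2^k) :
    PySem.Int.bor a ((if b then (1:Int) else 0) <<< k) = a + (if b then (1:Int) else 0) * 2^k := by
  cases b
  · simp only [Bool.false_eq_true, if_false]
    have hz : ((0:Int) <<< k) = 0 := by simp [Int.shiftLeft_eq]
    rw [hz, PySem.Int.bor_of_nonneg (a := a) (b := 0) h0 le_rfl]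
    simp [Int.toNat_of_nonneg h0]
  · simp only [if_true]
    have hs : ((1:Int) <<< k) = (2:Int)^k := by simp [Int.shiftLeft_eq]
    rw [hs, PySem.Int.bor_of_nonneg h0 (by positivity)]
    have ht : ((2:Int)^k).toNat = 2^k := by
      rw [show ((2:Int)^k) = ((2^k : Nat) : Int) by push_cast; ring, Int.toNat_natCast]
    rw [ht, nat_lor_two_pow_of_lt k a.toNat (by omega)]
    push_cast
    omega

-- pvV b = int(b); pvWsum bs k = Σᵢ pvV bs[i] · 2^(k+i): the common closed form both ports reach
def pvV (b : Bool) : Int := if b then 1 else 0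

def pvWsum : List Bool → Nat → Int
  | [], _ => 0
  | b :: bs, k => pvV b * 2 ^ k + pvWsum bs (k + 1)

theorem pvV_bounds (b : Bool) : 0 ≤ pvV b ∧ pvV b ≤ 1 := by cases b <;> simp [pvV]

theorem A_fold (bs : List Bool) : ∀ (k : Nat) (acc : Int), 0 ≤ acc → acc < 2 ^ k →
    (PySem.List.enumerate bs (k : Int)).foldl
      (fun result (p : Int × Bool) => PySem.Int.bor result ((if p.2 then (1 : Int) else 0) <<< p.1.toNat)) acc
    = acc + pvWsum bs k := by
  induction bs with
  | nil => intro k acc _ _; simp [PySem.List.enumerate_nil, pvWsum]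
  | cons b bs ih =>
    intro k acc h0 h1
    rw [PySem.List.enumerate_cons]
    simp only [List.foldl_cons]
    have hc : ((k : Int)).toNat = k := Int.toNat_natCast k
    rw [hc, bor_step acc b k h0 h1]
    have hb := pvV_bounds b
    have hcast : ((k : Int) + 1) = ((k + 1 : Nat) : Int) := by push_cast; ring
    rw [hcast, ih (k + 1) (acc + (if b then (1:Int) else 0) * 2 ^ k)
      (by have : (0:Int) ≤ (if b then (1:Int) else 0) := by cases b <;> norm_num
          positivity)
      (by have h2 : ((if b then (1:Int) else 0)) ≤ 1 := by cases b <;> norm_num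
          have h3 : (2:Int)^(k+1) = 2^k + 2^k := by ring
          nlinarith [pow_pos (show (0:Int) < 2 by norm_num) k])]
    simp [pvWsum, pvV]
    ring

theorem pvWsum_append (xs ys : List Bool) : ∀ k, pvWsum (xs ++ ys) k = pvWsum xs k + pvWsum ys (k + xs.length) := by
  induction xs with
  | nil => intro k; simp [pvWsum]
  | cons x xs ih =>
    intro k
    simp [pvWsum, ih (k + 1)]
    ring_nf

theorem B_horner (bs : List Bool) : ∀ acc : Int,
    List.foldl (fun a (b : Bool) => 2 * a + pvV b) acc bs = acc * 2 ^ bs.length + pvWsum bs.reverse 0 := by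
  induction bs with
  | nil => intro acc; simp [pvWsum]
  | cons b bs ih =>
    intro acc
    simp only [List.foldl_cons, List.reverse_cons, List.length_cons]
    rw [ih (2 * acc + pvV b), pvWsum_append]
    simp [pvWsum]
    ring

theorem B_eval (bs : List Bool) :
    pvParseBin (PySem.Str.join "" (bs.map (fun bit => PySem.Int.toStr (if bit then 1 else 0))))
    = pvWsum bs.reverse 0 := by
  have hjoin : (PySem.Str.join "" (bs.map (fun bit => PySem.Int.toStr (if bit then 1 else 0)))).toList
      = bs.map (fun b => if b then '1' else '0') := by
    rw [PySem.Str.toList_join]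
    have : (bs.map (fun bit => PySem.Int.toStr (if bit then 1 else 0))).map String.toList
        = (bs.map (fun b => if b then '1' else '0')).map ([·]) := by
      simp [List.map_map, Function.comp]
      exact ⟨fun _ => rfl, fun _ => rfl⟩
    rw [this]
    exact PySem.Chars.join_nil_singletons _
  unfold pvParseBin
  rw [hjoin, List.foldl_map]
  have : (fun (a : Int) (b : Bool) => 2 * a + if (if b then '1' else '0') = '1' then (1:Int) else 0)
      = fun a b => 2 * a + pvV b := by
    funext a b; cases b <;> simp [pvV]
  rw [this, B_horner]
  simp

theorem ports_agree (bit00 bit01 bit02 bit03 bit04 bit05 bit06 bit07 bit08 bit09 bit10 bit11 bit12 bit13 bit14 bit15 : Bool) :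
    bits_to_word1 bit00 bit01 bit02 bit03 bit04 bit05 bit06 bit07 bit08 bit09 bit10 bit11 bit12 bit13 bit14 bit15
    = bits_to_word1_alt bit00 bit01 bit02 bit03 bit04 bit05 bit06 bit07 bit08 bit09 bit10 bit11 bit12 bit13 bit14 bit15 := by
  unfold bits_to_word1 bits_to_word1_alt
  simp only [List.all_cons, List.all_nil, Bool.and_self, if_true, not_true, if_false]
  have hA := A_fold [bit15, bit14, bit13, bit12, bit11, bit10, bit09, bit08,
                     bit07, bit06, bit05, bit04, bit03, bit02, bit01, bit00] 0 0 le_rfl (by norm_num)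
  have hB := B_eval [bit00, bit01, bit02, bit03, bit04, bit05, bit06, bit07,
                     bit08, bit09, bit10, bit11, bit12, bit13, bit14, bit15]
  simp only [Nat.cast_zero] at hA
  rw [hA, hB]
  simp only [List.reverse_cons, List.reverse_nil, List.nil_append, List.cons_append, zero_add]

-- ===== VERDICT (by name: the statement is the Claim_ definition above) =====
theorem bits_to_word1_spec : Claim_equal_bits_to_word1 := by
  intro b00 b01 b02 b03 b04 b05 b06 b07 b08 b09 b10 b11 b12 b13 b14 b15 _
  unfold Spec_bits_to_word1
  exact ports_agree b00 b01 b02 b03 b04 b05 b06 b07 b08 b09 b10 b11 b12 b13 b14 b15
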